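-- pv_equiv track=rewrite | github.com/MAndrei2308/Connect-Four | ai.py | if_2_won
-- ===== SOURCE A (Python) =====
-- def if_2_won(player, board):
--     """
--     Checks if the given player has a 3 in a row on the game board.
--     The function try to find a 3 in a row in all directions (vertical, horizontal, primary diagonal, secondary diagonal).
--
--     Args:
--         player(int): The player number (1 or 2) to check for a win.
--         board(list[list[int]]): The current game board state.
--
--     Returns:
--         bool: True if the player has a 3 in a row, False otherwise.
--     """
--     for i in range(len(board)):
--         for j in range(len(board[i])):
--             if board[i][j] == player:
--                 # horizontal
--                 if (j + 2 < len(board[i]) and board[i][j + 1] == player and board[i][j + 2] == player) and (j - 1 >= 0 and j + 3 < len(board[i]) and board[i][j - 1] == 0 and board[i][j + 3] == 0):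
--                     return True
--                 # vertical
--                 if (i + 2 < len(board) and board[i + 1][j] == player and board[i + 2][j] == player) and (i + 3 < len(board) and board[i + 3][j] == 0):
--                     return True
--                 # primary diagonal
--                 if (i + 2 < len(board) and j + 2 < len(board[i]) and board[i + 1][j + 1] == player and board[i + 2][j + 2] == player) and (i - 1 >= 0 and j - 1 >= 0 and i + 3 < len(board) and j + 3 < len(board[i]) and board[i - 1][j - 1] == 0 and board[i + 3][j + 3] == 0):
--                     return True
--                 # secondary diagonal
--                 if (i + 2 < len(board) and j - 2 >= 0 and board[i + 1][j - 1] == player and board[i + 2][j - 2] == player) and (i - 1 >= 0 and j + 1 < len(board[i]) and i + 3 < len(board) and j - 3 >= 0 and board[i - 1][j + 1] == 0 and board[i + 3][j - 3] == 0):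
--                     return True
--     return False
-- ===== SOURCE B (Python) =====
-- def if_2_won(player, board):
--     R = len(board)
--     W = max((len(r) for r in board), default=0)
--
--     def open2(line):
--         n = len(line)
--         return any(line[t] == 0 and line[t + 1] == player and line[t + 2] == player
--                    and line[t + 3] == player and line[t + 4] == 0
--                    for t in range(n - 4))
--
--     def open1(line):
--         n = len(line)
--         return any(line[t] == player and line[t + 1] == player and line[t + 2] == player
--                    and line[t + 3] == 0
--                    for t in range(n - 3))
--
--     rows = board
--     cols = [[row[j] for row in board if j < len(row)] for j in range(W)]
--     starts_dr = [(i, 0) for i in range(1, R)] + [(0, j) for j in range(W)]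
--     diags_dr = [[board[i0 + k][j0 + k] for k in range(R - i0)
--                  if j0 + k < len(board[i0 + k])]
--                 for (i0, j0) in starts_dr]
--     starts_dl = [(0, j) for j in range(W)] + [(i, W - 1) for i in range(1, R)]
--     diags_dl = [[board[i0 + k][j0 - k] for k in range(min(R - i0, j0 + 1))
--                  if j0 - k < len(board[i0 + k])]
--                 for (i0, j0) in starts_dl]
--
--     return (any(open2(r) for r in rows)
--             or any(open1(c) for c in cols)
--             or any(open2(d) for d in diags_dr)
--             or any(open2(d) for d in diags_dl))
-- ===== Notes on version B (the rewrite author's own statement) =====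
-- stated objective: alternative
-- what changed: B first extracts every line of the board explicitly (rows, columns, down-right and down-left diagonals) and slides a fixed pattern window over each line ([0,p,p,p,0] two-sided for rows/diagonals, [p,p,p,0] one-sided for columns), replacing A's per-cell four-direction offset probing; …
-- outside the precondition, e.g. on if_2_won(1, [[0], [9, 1], [9, 9, 1], [9, 9, 9, 1], [9, 9, 9, 9, 0]]): A returns False, B returns True; on if_2_won(1, [[5, 1, 9], [9, 1], [9, 1, 9], [1, 9, 9], [0, 9, 9]]): A returns False, B returns False
import Mathlib
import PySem

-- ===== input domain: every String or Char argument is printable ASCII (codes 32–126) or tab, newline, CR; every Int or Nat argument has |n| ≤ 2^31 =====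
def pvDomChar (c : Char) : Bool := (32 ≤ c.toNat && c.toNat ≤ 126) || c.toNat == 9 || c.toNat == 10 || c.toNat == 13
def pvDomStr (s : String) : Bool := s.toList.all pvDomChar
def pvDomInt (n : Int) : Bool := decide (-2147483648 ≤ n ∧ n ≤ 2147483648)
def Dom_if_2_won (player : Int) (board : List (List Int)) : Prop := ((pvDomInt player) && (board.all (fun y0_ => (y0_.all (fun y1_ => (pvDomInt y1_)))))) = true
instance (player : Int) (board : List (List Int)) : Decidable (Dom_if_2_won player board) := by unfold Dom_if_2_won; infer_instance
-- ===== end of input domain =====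

-- B rebuilds the board as explicit lines (rows, columns, both diagonal families) and slides a
-- fixed pattern window over each line, instead of A's per-cell multi-direction offset probing;
-- objective: alternative decomposition (same asymptotic cost).

-- board[i][j]; exact whenever the indices are in range (all accesses below are guarded)
def pvG (board : List (List Int)) (i j : Nat) : Int := (board.getD i []).getD j 0

-- ===== PORT A =====
def if_2_won (player : Int) (board : List (List Int)) : Bool :=
  (List.range board.length).any fun i =>
    (List.range ((board.getD i []).length)).any fun j =>
      (pvG board i j == player) &&
      ( -- horizontal
        ((decide (j+2 < (board.getD i []).length) && (pvG board i (j+1) == player) && (pvG board i (j+2) == player))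
          && (decide (1 ≤ j) && decide (j+3 < (board.getD i []).length) && (pvG board i (j-1) == 0) && (pvG board i (j+3) == 0)))
        || -- vertical
        ((decide (i+2 < board.length) && (pvG board (i+1) j == player) && (pvG board (i+2) j == player))
          && (decide (i+3 < board.length) && (pvG board (i+3) j == 0)))
        || -- primary diagonal
        ((decide (i+2 < board.length) && decide (j+2 < (board.getD i []).length) && (pvG board (i+1) (j+1) == player) && (pvG board (i+2) (j+2) == player))
          && (decide (1 ≤ i) && decide (1 ≤ j) && decide (i+3 < board.length) && decide (j+3 < (board.getD i []).length) && (pvG board (i-1) (j-1) == 0) && (pvG board (i+3) (j+3) == 0)))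
        || -- secondary diagonal
        ((decide (i+2 < board.length) && decide (2 ≤ j) && (pvG board (i+1) (j-1) == player) && (pvG board (i+2) (j-2) == player))
          && (decide (1 ≤ i) && decide (j+1 < (board.getD i []).length) && decide (i+3 < board.length) && decide (3 ≤ j) && (pvG board (i-1) (j+1) == 0) && (pvG board (i+3) (j-3) == 0))))

-- ===== PORT B =====
def pvOpen2 (player : Int) (line : List Int) : Bool :=
  (List.range (line.length - 4)).any fun t =>
    (line.getD t 0 == 0) && (line.getD (t+1) 0 == player) && (line.getD (t+2) 0 == player) &&
    (line.getD (t+3) 0 == player) && (line.getD (t+4) 0 == 0)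

def pvOpen1 (player : Int) (line : List Int) : Bool :=
  (List.range (line.length - 3)).any fun t =>
    (line.getD t 0 == player) && (line.getD (t+1) 0 == player) && (line.getD (t+2) 0 == player) &&
    (line.getD (t+3) 0 == 0)

def if_2_won_alt (player : Int) (board : List (List Int)) : Bool :=
  let R := board.length
  let W := (board.map List.length).foldl Nat.max 0
  let cols := (List.range W).map (fun j => (board.filter (fun r => decide (j < r.length))).map (fun r => r.getD j 0))
  let startsDr := ((List.range' 1 (R-1)).map (fun i => (i, (0:Nat)))) ++ ((List.range W).map (fun j => ((0:Nat), j)))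
  let diagsDr := startsDr.map (fun s =>
    ((List.range (R - s.1)).filter (fun k => decide (s.2 + k < (board.getD (s.1 + k) []).length))).map
      (fun k => pvG board (s.1+k) (s.2+k)))
  let startsDl := ((List.range W).map (fun j => ((0:Nat), j))) ++ ((List.range' 1 (R-1)).map (fun i => (i, W-1)))
  let diagsDl := startsDl.map (fun s =>
    ((List.range (min (R - s.1) (s.2 + 1))).filter (fun k => decide (s.2 - k < (board.getD (s.1 + k) []).length))).map
      (fun k => pvG board (s.1+k) (s.2-k)))
  board.any (pvOpen2 player) || cols.any (pvOpen1 player) || diagsDr.any (pvOpen2 player) || diagsDl.any (pvOpen2 player)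

-- ===== PRECONDITION & SPEC =====
-- Pre_ admits rectangular boards (every row the same length), any board with at most two rows
-- (there only the row-local horizontal probe of A is reachable), and any board without a player
-- cell (both programs trivially find nothing).  It excludes the remaining ragged boards: a game
-- grid is rectangular, and on ragged boards A's cross-row probes guard each access against the
-- length of the PROBING CELL'S row, so they can raise IndexError, and where they happen to
-- return, that value is an unspecified corner no caller would rely on; B extracts well-formed
-- lines there instead.
def Pre_if_2_won (player : Int) (board : List (List Int)) : Prop :=
  (∀ r ∈ board, r.length = (board.headD []).length) ∨ board.length ≤ 2 ∨ (∀ r ∈ board, player ∉ r)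
instance (player : Int) (board : List (List Int)) : Decidable (Pre_if_2_won player board) := by
  unfold Pre_if_2_won; infer_instance
def pvWitness_if_2_won : Int × List (List Int) := (1, [[0,1,1,1,0],[0,0,0,0,0]])

def Spec_if_2_won (player : Int) (board : List (List Int)) (out : Bool) : Prop := out = if_2_won_alt player board
instance (player : Int) (board : List (List Int)) (out : Bool) : Decidable (Spec_if_2_won player board out) := by unfold Spec_if_2_won; infer_instance

-- ===== CLAIM (what is proved, stated in full; the proofs are below) =====
def Claim_equal_if_2_won : Prop := ∀ (player : Int) (board : List (List Int)), Dom_if_2_won player board → Pre_if_2_won player board → Spec_if_2_won player board (if_2_won player board)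

-- ===== LEMMAS AND PROOFS =====

-- proof-only abbreviations: board dimensions (pvL i = length of row i)
def pvR (b : List (List Int)) : Nat := b.length
def pvC (b : List (List Int)) : Nat := (b.headD []).length
def pvL (b : List (List Int)) (i : Nat) : Nat := (b.getD i []).length

-- A's four per-cell direction conditions, as Props over the total getter pvG
def pvH (p : Int) (b : List (List Int)) (i j : Nat) : Prop :=
  j+2 < pvL b i ∧ pvG b i (j+1) = p ∧ pvG b i (j+2) = p ∧ 1 ≤ j ∧ j+3 < pvL b i ∧ pvG b i (j-1) = 0 ∧ pvG b i (j+3) = 0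
def pvV (p : Int) (b : List (List Int)) (i j : Nat) : Prop :=
  i+2 < pvR b ∧ pvG b (i+1) j = p ∧ pvG b (i+2) j = p ∧ i+3 < pvR b ∧ pvG b (i+3) j = 0
def pvD1 (p : Int) (b : List (List Int)) (i j : Nat) : Prop :=
  i+2 < pvR b ∧ j+2 < pvL b i ∧ pvG b (i+1) (j+1) = p ∧ pvG b (i+2) (j+2) = p ∧ 1 ≤ i ∧ 1 ≤ j ∧ i+3 < pvR b ∧ j+3 < pvL b i ∧ pvG b (i-1) (j-1) = 0 ∧ pvG b (i+3) (j+3) = 0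
def pvD2 (p : Int) (b : List (List Int)) (i j : Nat) : Prop :=
  i+2 < pvR b ∧ 2 ≤ j ∧ pvG b (i+1) (j-1) = p ∧ pvG b (i+2) (j-2) = p ∧ 1 ≤ i ∧ j+1 < pvL b i ∧ i+3 < pvR b ∧ 3 ≤ j ∧ pvG b (i-1) (j+1) = 0 ∧ pvG b (i+3) (j-3) = 0

def pvPA (p : Int) (b : List (List Int)) : Prop :=
  ∃ i, i < pvR b ∧ ∃ j, j < pvL b i ∧ (pvG b i j = p ∧ (pvH p b i j ∨ pvV p b i j ∨ pvD1 p b i j ∨ pvD2 p b i j))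

-- B's four line families, as Props (row windows are row-local; the others use the common width)
def pvRowP (p : Int) (b : List (List Int)) : Prop :=
  ∃ i, i < pvR b ∧ ∃ t, t + 4 < pvL b i ∧ (pvG b i t = 0 ∧ pvG b i (t+1) = p ∧ pvG b i (t+2) = p ∧ pvG b i (t+3) = p ∧ pvG b i (t+4) = 0)
def pvColP (p : Int) (b : List (List Int)) : Prop :=
  ∃ j, j < pvC b ∧ ∃ t, t + 3 < pvR b ∧ (pvG b t j = p ∧ pvG b (t+1) j = p ∧ pvG b (t+2) j = p ∧ pvG b (t+3) j = 0)
def pvDg1 (p : Int) (b : List (List Int)) : Prop :=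
  ∃ i0 j0 t, ((1 ≤ i0 ∧ i0 < pvR b ∧ j0 = 0) ∨ (i0 = 0 ∧ j0 < pvC b)) ∧ t + 4 < min (pvR b - i0) (pvC b - j0) ∧
    (pvG b (i0+t) (j0+t) = 0 ∧ pvG b (i0+(t+1)) (j0+(t+1)) = p ∧ pvG b (i0+(t+2)) (j0+(t+2)) = p ∧ pvG b (i0+(t+3)) (j0+(t+3)) = p ∧ pvG b (i0+(t+4)) (j0+(t+4)) = 0)
def pvDg2 (p : Int) (b : List (List Int)) : Prop :=
  ∃ i0 j0 t, ((i0 = 0 ∧ j0 < pvC b) ∨ (1 ≤ i0 ∧ i0 < pvR b ∧ j0 = pvC b - 1)) ∧ t + 4 < min (pvR b - i0) (j0 + 1) ∧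
    (pvG b (i0+t) (j0-t) = 0 ∧ pvG b (i0+(t+1)) (j0-(t+1)) = p ∧ pvG b (i0+(t+2)) (j0-(t+2)) = p ∧ pvG b (i0+(t+3)) (j0-(t+3)) = p ∧ pvG b (i0+(t+4)) (j0-(t+4)) = 0)

lemma pv_row_mem (b : List (List Int)) (i : Nat) (hi : i < b.length) : b.getD i [] ∈ b := by
  rw [List.getD_eq_getElem b [] hi]
  exact List.getElem_mem hi

lemma pv_getD_mem (l : List Int) (t : Nat) (h : t < l.length) : l.getD t 0 ∈ l := by
  rw [List.getD_eq_getElem l 0 h]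
  exact List.getElem_mem h

lemma pv_hlen (board : List (List Int)) (hpre : ∀ r ∈ board, r.length = (board.headD []).length)
    (i : Nat) (hi : i < board.length) : pvL board i = pvC board := by
  have hmem : board.getD i [] ∈ board := by
    rw [List.getD_eq_getElem board [] hi]
    exact List.getElem_mem hi
  exact hpre _ hmem

lemma pv_any_idx (l : List (List Int)) (p : List Int → Bool) :
    l.any p = true ↔ ∃ i, i < l.length ∧ p (l.getD i []) = true := by
  rw [List.any_eq_true]
  constructor
  · rintro ⟨a, ha, hpa⟩
    obtain ⟨i, hi, rfl⟩ := List.mem_iff_getElem.mp ha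
    exact ⟨i, hi, by rwa [List.getD_eq_getElem l [] hi]⟩
  · rintro ⟨i, hi, hp⟩
    refine ⟨l.getD i [], ?_, hp⟩
    rw [List.getD_eq_getElem l [] hi]
    exact List.getElem_mem hi

lemma pv_getD_map_range (f : Nat → Int) (n t : Nat) (ht : t < n) :
    ((List.range n).map f).getD t 0 = f t := by
  rw [List.getD_eq_getElem _ _ (by simpa using ht)]
  simp

lemma pv_getD_map_board (f : List Int → Int) (b : List (List Int)) (t : Nat) (h : t < b.length) :
    (b.map f).getD t 0 = f (b.getD t []) := by
  rw [List.getD_eq_getElem _ _ (by simpa using h), List.getD_eq_getElem b [] h]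
  simp

lemma pv_foldl_max_le (l : List Nat) (acc : Nat) (h : ∀ x ∈ l, x ≤ acc) :
    l.foldl Nat.max acc = acc := by
  induction l generalizing acc with
  | nil => rfl
  | cons a t ih =>
    have ha : Nat.max acc a = acc := Nat.max_eq_left (h a (by simp))
    simp only [List.foldl_cons, ha]
    exact ih acc (fun x hx => h x (by simp [hx]))

lemma pv_fold_max (b : List (List Int)) (hpre : ∀ r ∈ b, r.length = (b.headD []).length) :
    (b.map List.length).foldl Nat.max 0 = pvC b := by
  cases b with
  | nil => rfl
  | cons r t =>
    have hC : pvC (r :: t) = r.length := rfl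
    rw [hC]
    simp only [List.map_cons, List.foldl_cons]
    have h0 : Nat.max 0 r.length = r.length := Nat.max_eq_right (Nat.zero_le _)
    rw [h0]
    exact pv_foldl_max_le _ _ (fun x hx => by
      obtain ⟨s, hs, rfl⟩ := List.mem_map.mp hx
      rw [hpre s (by simp [hs])]
      rfl)

lemma pv_filter_range_add (n m j0 : Nat) :
    (List.range n).filter (fun k => decide (j0 + k < m)) = List.range (min n (m - j0)) := by
  induction n with
  | zero => rfl
  | succ n ih =>
    rw [List.range_succ, List.filter_append, ih]
    by_cases h : j0 + n < m
    · have hone : List.filter (fun k => decide (j0 + k < m)) [n] = [n] := by simp [h]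
      rw [hone, show min n (m - j0) = n from by omega,
        show min (n+1) (m - j0) = n+1 from by omega, List.range_succ]
    · have hone : List.filter (fun k => decide (j0 + k < m)) [n] = [] := by simp [h]
      rw [hone, List.append_nil, show min (n+1) (m - j0) = min n (m - j0) from by omega]

lemma pv_open2_line_iff (p : Int) (l : List Int) :
    pvOpen2 p l = true ↔ ∃ t, t + 4 < l.length ∧ (l.getD t 0 = 0 ∧ l.getD (t+1) 0 = p ∧ l.getD (t+2) 0 = p ∧ l.getD (t+3) 0 = p ∧ l.getD (t+4) 0 = 0) := by
  unfold pvOpen2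
  simp only [List.any_eq_true, List.mem_range, Bool.and_eq_true, beq_iff_eq, and_assoc]
  constructor <;> rintro ⟨t, ht, h⟩ <;> exact ⟨t, by omega, h⟩

lemma pv_open2_short (p : Int) (l : List Int) (h : l.length < 5) : pvOpen2 p l = false := by
  unfold pvOpen2
  rw [show l.length - 4 = 0 from by omega]
  rfl

lemma pv_open1_short (p : Int) (l : List Int) (h : l.length < 4) : pvOpen1 p l = false := by
  unfold pvOpen1
  rw [show l.length - 3 = 0 from by omega]
  rfl

lemma pv_open2_map_iff (p : Int) (f : Nat → Int) (n : Nat) :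
    pvOpen2 p ((List.range n).map f) = true ↔
      ∃ t, t + 4 < n ∧ (f t = 0 ∧ f (t+1) = p ∧ f (t+2) = p ∧ f (t+3) = p ∧ f (t+4) = 0) := by
  rw [pv_open2_line_iff]
  simp only [List.length_map, List.length_range]
  constructor
  · rintro ⟨t, ht, h0, h1, h2, h3, h4⟩
    rw [pv_getD_map_range f n t (by omega)] at h0
    rw [pv_getD_map_range f n (t+1) (by omega)] at h1
    rw [pv_getD_map_range f n (t+2) (by omega)] at h2
    rw [pv_getD_map_range f n (t+3) (by omega)] at h3
    rw [pv_getD_map_range f n (t+4) (by omega)] at h4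
    exact ⟨t, ht, h0, h1, h2, h3, h4⟩
  · rintro ⟨t, ht, h0, h1, h2, h3, h4⟩
    refine ⟨t, ht, ?_, ?_, ?_, ?_, ?_⟩
    · rw [pv_getD_map_range f n t (by omega)]; exact h0
    · rw [pv_getD_map_range f n (t+1) (by omega)]; exact h1
    · rw [pv_getD_map_range f n (t+2) (by omega)]; exact h2
    · rw [pv_getD_map_range f n (t+3) (by omega)]; exact h3
    · rw [pv_getD_map_range f n (t+4) (by omega)]; exact h4

lemma pv_open1_mapb_iff (p : Int) (b : List (List Int)) (f : List Int → Int) :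
    pvOpen1 p (b.map f) = true ↔
      ∃ t, t + 3 < b.length ∧ (f (b.getD t []) = p ∧ f (b.getD (t+1) []) = p ∧ f (b.getD (t+2) []) = p ∧ f (b.getD (t+3) []) = 0) := by
  unfold pvOpen1
  simp only [List.any_eq_true, List.mem_range, Bool.and_eq_true, beq_iff_eq, and_assoc, List.length_map]
  constructor
  · rintro ⟨t, ht, h0, h1, h2, h3⟩
    rw [pv_getD_map_board f b t (by omega)] at h0
    rw [pv_getD_map_board f b (t+1) (by omega)] at h1
    rw [pv_getD_map_board f b (t+2) (by omega)] at h2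
    rw [pv_getD_map_board f b (t+3) (by omega)] at h3
    exact ⟨t, by omega, h0, h1, h2, h3⟩
  · rintro ⟨t, ht, h0, h1, h2, h3⟩
    refine ⟨t, by omega, ?_, ?_, ?_, ?_⟩
    · rw [pv_getD_map_board f b t (by omega)]; exact h0
    · rw [pv_getD_map_board f b (t+1) (by omega)]; exact h1
    · rw [pv_getD_map_board f b (t+2) (by omega)]; exact h2
    · rw [pv_getD_map_board f b (t+3) (by omega)]; exact h3

lemma pv_rowsB (p : Int) (b : List (List Int)) :
    b.any (pvOpen2 p) = true ↔ pvRowP p b := by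
  rw [pv_any_idx]
  simp only [pv_open2_line_iff]
  unfold pvRowP pvR pvL
  constructor
  · rintro ⟨i, hi, t, ht, h⟩; exact ⟨i, hi, t, ht, h⟩
  · rintro ⟨i, hi, t, ht, h⟩; exact ⟨i, hi, t, ht, h⟩

lemma pv_colsB (p : Int) (b : List (List Int)) (hpre : ∀ r ∈ b, r.length = (b.headD []).length) :
    (((List.range ((b.map List.length).foldl Nat.max 0)).map (fun j => (b.filter (fun r => decide (j < r.length))).map (fun r => r.getD j 0))).any (pvOpen1 p)) = true ↔ pvColP p b := by
  rw [pv_fold_max b hpre]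
  simp only [List.any_map, List.any_eq_true, List.mem_range, Function.comp]
  unfold pvColP pvR
  constructor
  · rintro ⟨j, hj, hopen⟩
    rw [List.filter_eq_self.mpr (fun r hr => by rw [hpre r hr]; exact decide_eq_true hj)] at hopen
    rw [pv_open1_mapb_iff] at hopen
    obtain ⟨t, ht, hw⟩ := hopen
    exact ⟨j, hj, t, ht, hw⟩
  · rintro ⟨j, hj, t, ht, hw⟩
    refine ⟨j, hj, ?_⟩
    rw [List.filter_eq_self.mpr (fun r hr => by rw [hpre r hr]; exact decide_eq_true hj)]
    rw [pv_open1_mapb_iff]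
    exact ⟨t, ht, hw⟩

lemma pv_d1B (p : Int) (b : List (List Int)) (hpre : ∀ r ∈ b, r.length = (b.headD []).length) :
    (((((List.range' 1 (b.length - 1)).map (fun i => (i, (0:Nat)))) ++ ((List.range ((b.map List.length).foldl Nat.max 0)).map (fun j => ((0:Nat), j)))).map
      (fun s => ((List.range (b.length - s.1)).filter (fun k => decide (s.2 + k < (b.getD (s.1 + k) []).length))).map (fun k => pvG b (s.1+k) (s.2+k)))).any (pvOpen2 p)) = true ↔ pvDg1 p b := by
  rw [pv_fold_max b hpre]
  simp only [List.any_map, List.any_append, Bool.or_eq_true, List.any_eq_true, List.mem_range, List.mem_range'_1, Function.comp]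
  have hfil : ∀ i0 j0 : Nat, (List.range (b.length - i0)).filter (fun k => decide (j0 + k < (b.getD (i0 + k) []).length)) = List.range (min (b.length - i0) (pvC b - j0)) := by
    intro i0 j0
    have hcong : ∀ k ∈ List.range (b.length - i0), decide (j0 + k < (b.getD (i0 + k) []).length) = decide (j0 + k < pvC b) := by
      intro k hk
      rw [List.mem_range] at hk
      rw [show (b.getD (i0 + k) []).length = pvL b (i0+k) from rfl, pv_hlen b hpre (i0+k) (by omega)]
    rw [List.filter_congr hcong]
    exact pv_filter_range_add _ _ _
  unfold pvDg1 pvR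
  constructor
  · rintro (⟨i0, ⟨h1, h2⟩, hopen⟩ | ⟨j0, hj0, hopen⟩)
    · rw [hfil i0 0, pv_open2_map_iff] at hopen
      obtain ⟨t, ht, hw⟩ := hopen
      exact ⟨i0, 0, t, Or.inl ⟨h1, by omega, rfl⟩, ht, hw⟩
    · rw [hfil 0 j0, pv_open2_map_iff] at hopen
      obtain ⟨t, ht, hw⟩ := hopen
      exact ⟨0, j0, t, Or.inr ⟨rfl, hj0⟩, ht, hw⟩
  · rintro ⟨i0, j0, t, hstart, ht, hw⟩
    rcases hstart with ⟨h1, h2, rfl⟩ | ⟨rfl, hj0⟩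
    · refine Or.inl ⟨i0, ⟨h1, by omega⟩, ?_⟩
      rw [hfil i0 0, pv_open2_map_iff]
      exact ⟨t, ht, hw⟩
    · refine Or.inr ⟨j0, hj0, ?_⟩
      rw [hfil 0 j0, pv_open2_map_iff]
      exact ⟨t, ht, hw⟩

lemma pv_d2B (p : Int) (b : List (List Int)) (hpre : ∀ r ∈ b, r.length = (b.headD []).length) :
    ((((List.range ((b.map List.length).foldl Nat.max 0)).map (fun j => ((0:Nat), j))) ++ ((List.range' 1 (b.length - 1)).map (fun i => (i, (b.map List.length).foldl Nat.max 0 - 1)))).map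
      (fun s => ((List.range (min (b.length - s.1) (s.2 + 1))).filter (fun k => decide (s.2 - k < (b.getD (s.1 + k) []).length))).map (fun k => pvG b (s.1+k) (s.2-k)))).any (pvOpen2 p) = true ↔ pvDg2 p b := by
  rw [pv_fold_max b hpre]
  simp only [List.any_map, List.any_append, Bool.or_eq_true, List.any_eq_true, List.mem_range, List.mem_range'_1, Function.comp]
  have hfil : ∀ i0 j0 : Nat, j0 < pvC b →
      (List.range (min (b.length - i0) (j0 + 1))).filter (fun k => decide (j0 - k < (b.getD (i0 + k) []).length)) = List.range (min (b.length - i0) (j0 + 1)) := by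
    intro i0 j0 hj0
    have hcong : ∀ k ∈ List.range (min (b.length - i0) (j0 + 1)), decide (j0 - k < (b.getD (i0 + k) []).length) = true := by
      intro k hk
      rw [List.mem_range] at hk
      rw [show (b.getD (i0 + k) []).length = pvL b (i0+k) from rfl, pv_hlen b hpre (i0+k) (by omega)]
      exact decide_eq_true (by omega)
    rw [List.filter_congr hcong, List.filter_true]
  unfold pvDg2 pvR
  constructor
  · rintro (⟨j0, hj0, hopen⟩ | ⟨i0, ⟨h1, h2⟩, hopen⟩)
    · rw [hfil 0 j0 hj0, pv_open2_map_iff] at hopen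
      obtain ⟨t, ht, hw⟩ := hopen
      exact ⟨0, j0, t, Or.inl ⟨rfl, hj0⟩, ht, hw⟩
    · by_cases hC : pvC b = 0
      · exfalso
        have hcong : ∀ k ∈ List.range (min (b.length - i0) (pvC b - 1 + 1)), decide (pvC b - 1 - k < (b.getD (i0 + k) []).length) = false := by
          intro k hk
          rw [List.mem_range] at hk
          rw [show (b.getD (i0 + k) []).length = pvL b (i0+k) from rfl, pv_hlen b hpre (i0+k) (by omega)]
          exact decide_eq_false (by omega)
        rw [List.filter_congr hcong, List.filter_false] at hopen
        simp [pvOpen2] at hopen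
      · rw [hfil i0 (pvC b - 1) (by omega), pv_open2_map_iff] at hopen
        obtain ⟨t, ht, hw⟩ := hopen
        exact ⟨i0, pvC b - 1, t, Or.inr ⟨h1, by omega, rfl⟩, ht, hw⟩
  · rintro ⟨i0, j0, t, hstart, ht, hw⟩
    rcases hstart with ⟨rfl, hj0⟩ | ⟨h1, h2, rfl⟩
    · refine Or.inl ⟨j0, hj0, ?_⟩
      rw [hfil 0 j0 hj0, pv_open2_map_iff]
      exact ⟨t, ht, hw⟩
    · refine Or.inr ⟨i0, ⟨h1, by omega⟩, ?_⟩
      rw [hfil i0 (pvC b - 1) (by omega), pv_open2_map_iff]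
      exact ⟨t, ht, hw⟩

lemma pv_A_iff (player : Int) (board : List (List Int)) :
    if_2_won player board = true ↔ pvPA player board := by
  unfold if_2_won pvPA pvH pvV pvD1 pvD2 pvR pvL
  simp only [List.any_eq_true, List.mem_range, Bool.and_eq_true, Bool.or_eq_true,
    decide_eq_true_eq, beq_iff_eq, and_assoc, or_assoc]

lemma pv_B_iff (player : Int) (board : List (List Int))
    (hpre : ∀ r ∈ board, r.length = (board.headD []).length) :
    if_2_won_alt player board = true ↔ (pvRowP player board ∨ pvColP player board ∨ pvDg1 player board ∨ pvDg2 player board) := by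
  have h : if_2_won_alt player board =
      (board.any (pvOpen2 player) ||
       (((List.range ((board.map List.length).foldl Nat.max 0)).map (fun j => (board.filter (fun r => decide (j < r.length))).map (fun r => r.getD j 0))).any (pvOpen1 player)) ||
       (((((List.range' 1 (board.length - 1)).map (fun i => (i, (0:Nat)))) ++ ((List.range ((board.map List.length).foldl Nat.max 0)).map (fun j => ((0:Nat), j)))).map
         (fun s => ((List.range (board.length - s.1)).filter (fun k => decide (s.2 + k < (board.getD (s.1 + k) []).length))).map (fun k => pvG board (s.1+k) (s.2+k)))).any (pvOpen2 player)) ||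
       ((((List.range ((board.map List.length).foldl Nat.max 0)).map (fun j => ((0:Nat), j))) ++ ((List.range' 1 (board.length - 1)).map (fun i => (i, (board.map List.length).foldl Nat.max 0 - 1)))).map
         (fun s => ((List.range (min (board.length - s.1) (s.2 + 1))).filter (fun k => decide (s.2 - k < (board.getD (s.1 + k) []).length))).map (fun k => pvG board (s.1+k) (s.2-k)))).any (pvOpen2 player)) := rfl
  rw [h, Bool.or_eq_true, Bool.or_eq_true, Bool.or_eq_true, or_assoc, or_assoc]
  exact or_congr (pv_rowsB player board) (or_congr (pv_colsB player board hpre)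
    (or_congr (pv_d1B player board hpre) (pv_d2B player board hpre)))

lemma pv_B_small (player : Int) (board : List (List Int)) (hsmall : board.length ≤ 2) :
    if_2_won_alt player board = true ↔ pvRowP player board := by
  have h : if_2_won_alt player board =
      (board.any (pvOpen2 player) ||
       (((List.range ((board.map List.length).foldl Nat.max 0)).map (fun j => (board.filter (fun r => decide (j < r.length))).map (fun r => r.getD j 0))).any (pvOpen1 player)) ||
       (((((List.range' 1 (board.length - 1)).map (fun i => (i, (0:Nat)))) ++ ((List.range ((board.map List.length).foldl Nat.max 0)).map (fun j => ((0:Nat), j)))).map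
         (fun s => ((List.range (board.length - s.1)).filter (fun k => decide (s.2 + k < (board.getD (s.1 + k) []).length))).map (fun k => pvG board (s.1+k) (s.2+k)))).any (pvOpen2 player)) ||
       ((((List.range ((board.map List.length).foldl Nat.max 0)).map (fun j => ((0:Nat), j))) ++ ((List.range' 1 (board.length - 1)).map (fun i => (i, (board.map List.length).foldl Nat.max 0 - 1)))).map
         (fun s => ((List.range (min (board.length - s.1) (s.2 + 1))).filter (fun k => decide (s.2 - k < (board.getD (s.1 + k) []).length))).map (fun k => pvG board (s.1+k) (s.2-k)))).any (pvOpen2 player)) := rfl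
  have hcols : (((List.range ((board.map List.length).foldl Nat.max 0)).map (fun j => (board.filter (fun r => decide (j < r.length))).map (fun r => r.getD j 0))).any (pvOpen1 player)) = false := by
    rw [List.any_eq_false]
    intro x hx
    obtain ⟨j, _, rfl⟩ := List.mem_map.mp hx
    have hlen : ((board.filter (fun r => decide (j < r.length))).map (fun r => r.getD j 0)).length < 4 := by
      simp only [List.length_map]
      have := List.length_filter_le (fun r => decide (j < r.length)) board
      omega
    rw [pv_open1_short player _ hlen]
    exact Bool.false_ne_true
  have hdr : (((((List.range' 1 (board.length - 1)).map (fun i => (i, (0:Nat)))) ++ ((List.range ((board.map List.length).foldl Nat.max 0)).map (fun j => ((0:Nat), j)))).map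
      (fun s => ((List.range (board.length - s.1)).filter (fun k => decide (s.2 + k < (board.getD (s.1 + k) []).length))).map (fun k => pvG board (s.1+k) (s.2+k)))).any (pvOpen2 player)) = false := by
    rw [List.any_eq_false]
    intro x hx
    obtain ⟨s, _, rfl⟩ := List.mem_map.mp hx
    have hlen : (((List.range (board.length - s.1)).filter (fun k => decide (s.2 + k < (board.getD (s.1 + k) []).length))).map (fun k => pvG board (s.1+k) (s.2+k))).length < 5 := by
      simp only [List.length_map]
      have := List.length_filter_le (fun k => decide (s.2 + k < (board.getD (s.1 + k) []).length)) (List.range (board.length - s.1))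
      simp only [List.length_range] at this
      omega
    rw [pv_open2_short player _ hlen]
    exact Bool.false_ne_true
  have hdl : ((((List.range ((board.map List.length).foldl Nat.max 0)).map (fun j => ((0:Nat), j))) ++ ((List.range' 1 (board.length - 1)).map (fun i => (i, (board.map List.length).foldl Nat.max 0 - 1)))).map
      (fun s => ((List.range (min (board.length - s.1) (s.2 + 1))).filter (fun k => decide (s.2 - k < (board.getD (s.1 + k) []).length))).map (fun k => pvG board (s.1+k) (s.2-k)))).any (pvOpen2 player) = false := by
    rw [List.any_eq_false]
    intro x hx
    obtain ⟨s, _, rfl⟩ := List.mem_map.mp hx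
    have hlen : (((List.range (min (board.length - s.1) (s.2 + 1))).filter (fun k => decide (s.2 - k < (board.getD (s.1 + k) []).length))).map (fun k => pvG board (s.1+k) (s.2-k))).length < 5 := by
      simp only [List.length_map]
      have := List.length_filter_le (fun k => decide (s.2 - k < (board.getD (s.1 + k) []).length)) (List.range (min (board.length - s.1) (s.2 + 1)))
      simp only [List.length_range] at this
      omega
    rw [pv_open2_short player _ hlen]
    exact Bool.false_ne_true
  rw [h, hcols, hdr, hdl, Bool.or_false, Bool.or_false, Bool.or_false]
  exact pv_rowsB player board

lemma pv_rowdir (player : Int) (board : List (List Int)) :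
    (∃ i, i < pvR board ∧ ∃ j, j < pvL board i ∧ (pvG board i j = player ∧ pvH player board i j)) ↔ pvRowP player board := by
  unfold pvH pvRowP
  constructor
  · rintro ⟨i, hi, j, hj, hc, h1, h2, h3, h4, h5, h6, h7⟩
    refine ⟨i, hi, j-1, by omega, h6, ?_, ?_, ?_, ?_⟩
    · rw [show j-1+1 = j from by omega]; exact hc
    · rw [show j-1+2 = j+1 from by omega]; exact h2
    · rw [show j-1+3 = j+2 from by omega]; exact h3
    · rw [show j-1+4 = j+3 from by omega]; exact h7
  · rintro ⟨i, hi, t, ht, h0, h1, h2, h3, h4⟩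
    refine ⟨i, hi, t+1, by omega, h1, by omega, ?_, ?_, by omega, by omega, ?_, ?_⟩
    · rw [show t+1+1 = t+2 from by omega]; exact h2
    · rw [show t+1+2 = t+3 from by omega]; exact h3
    · rw [show t+1-1 = t from by omega]; exact h0
    · rw [show t+1+3 = t+4 from by omega]; exact h4

lemma pv_coldir (player : Int) (board : List (List Int))
    (hpre : ∀ r ∈ board, r.length = (board.headD []).length) :
    (∃ i, i < pvR board ∧ ∃ j, j < pvL board i ∧ (pvG board i j = player ∧ pvV player board i j)) ↔ pvColP player board := by
  unfold pvV pvColP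
  have hRR : pvR board = board.length := rfl
  constructor
  · rintro ⟨i, hi, j, hj, hc, h1, h2, h3, h4, h5⟩
    have hL : pvL board i = pvC board := pv_hlen board hpre i hi
    exact ⟨j, by omega, i, h4, hc, h2, h3, h5⟩
  · rintro ⟨j, hj, t, ht, h0, h1, h2, h3⟩
    have hL : pvL board t = pvC board := pv_hlen board hpre t (by omega)
    exact ⟨t, by omega, j, by omega, h0, by omega, h1, h2, by omega, h3⟩

lemma pv_d1dir (player : Int) (board : List (List Int))
    (hpre : ∀ r ∈ board, r.length = (board.headD []).length) :
    (∃ i, i < pvR board ∧ ∃ j, j < pvL board i ∧ (pvG board i j = player ∧ pvD1 player board i j)) ↔ pvDg1 player board := by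
  unfold pvD1 pvDg1
  have hRR : pvR board = board.length := rfl
  constructor
  · rintro ⟨i, hi, j, hj, hc, h1, h2, h3, h4, h5, h6, h7, h8, h9, h10⟩
    have hL : pvL board i = pvC board := pv_hlen board hpre i hi
    by_cases hij : i ≤ j
    · refine ⟨0, j-i, i-1, Or.inr ⟨rfl, by omega⟩, by omega, ?_, ?_, ?_, ?_, ?_⟩ <;>
        simp only [show (0:Nat)+(i-1) = i-1 from by omega, show (0:Nat)+(i-1+1) = i from by omega,
          show (0:Nat)+(i-1+2) = i+1 from by omega, show (0:Nat)+(i-1+3) = i+2 from by omega,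
          show (0:Nat)+(i-1+4) = i+3 from by omega, show j-i+(i-1) = j-1 from by omega,
          show j-i+(i-1+1) = j from by omega, show j-i+(i-1+2) = j+1 from by omega,
          show j-i+(i-1+3) = j+2 from by omega, show j-i+(i-1+4) = j+3 from by omega] <;>
        assumption
    · refine ⟨i-j, 0, j-1, Or.inl ⟨by omega, by omega, rfl⟩, by omega, ?_, ?_, ?_, ?_, ?_⟩ <;>
        simp only [show i-j+(j-1) = i-1 from by omega, show i-j+(j-1+1) = i from by omega,
          show i-j+(j-1+2) = i+1 from by omega, show i-j+(j-1+3) = i+2 from by omega,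
          show i-j+(j-1+4) = i+3 from by omega, show (0:Nat)+(j-1) = j-1 from by omega,
          show (0:Nat)+(j-1+1) = j from by omega, show (0:Nat)+(j-1+2) = j+1 from by omega,
          show (0:Nat)+(j-1+3) = j+2 from by omega, show (0:Nat)+(j-1+4) = j+3 from by omega] <;>
        assumption
  · rintro ⟨i0, j0, t, hstart, hb, h0, h1, h2, h3, h4⟩
    have hL : pvL board (i0+t+1) = pvC board := pv_hlen board hpre (i0+t+1) (by omega)
    refine ⟨i0+t+1, by omega, j0+t+1, by omega, h1, by omega, by omega, h2, h3, by omega, by omega, by omega, by omega, ?_, h4⟩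
    rw [show i0+t+1-1 = i0+t from by omega, show j0+t+1-1 = j0+t from by omega]
    exact h0

lemma pv_d2dir (player : Int) (board : List (List Int))
    (hpre : ∀ r ∈ board, r.length = (board.headD []).length) :
    (∃ i, i < pvR board ∧ ∃ j, j < pvL board i ∧ (pvG board i j = player ∧ pvD2 player board i j)) ↔ pvDg2 player board := by
  unfold pvD2 pvDg2
  have hRR : pvR board = board.length := rfl
  constructor
  · rintro ⟨i, hi, j, hj, hc, h1, h2, h3, h4, h5, h6, h7, h8, h9, h10⟩
    have hL : pvL board i = pvC board := pv_hlen board hpre i hi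
    by_cases hca : i-1 ≤ pvC board - 2 - j
    · refine ⟨0, j+i, i-1, Or.inl ⟨rfl, by omega⟩, by omega, ?_, ?_, ?_, ?_, ?_⟩ <;>
        simp only [show (0:Nat)+(i-1) = i-1 from by omega, show (0:Nat)+(i-1+1) = i from by omega,
          show (0:Nat)+(i-1+2) = i+1 from by omega, show (0:Nat)+(i-1+3) = i+2 from by omega,
          show (0:Nat)+(i-1+4) = i+3 from by omega, show j+i-(i-1) = j+1 from by omega,
          show j+i-(i-1+1) = j from by omega, show j+i-(i-1+2) = j-1 from by omega,
          show j+i-(i-1+3) = j-2 from by omega, show j+i-(i-1+4) = j-3 from by omega] <;>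
        assumption
    · refine ⟨i-1-(pvC board-2-j), pvC board - 1, pvC board-2-j, Or.inr ⟨by omega, by omega, rfl⟩, by omega, ?_, ?_, ?_, ?_, ?_⟩ <;>
        simp only [show i-1-(pvC board-2-j)+(pvC board-2-j) = i-1 from by omega,
          show i-1-(pvC board-2-j)+(pvC board-2-j+1) = i from by omega,
          show i-1-(pvC board-2-j)+(pvC board-2-j+2) = i+1 from by omega,
          show i-1-(pvC board-2-j)+(pvC board-2-j+3) = i+2 from by omega,
          show i-1-(pvC board-2-j)+(pvC board-2-j+4) = i+3 from by omega,
          show pvC board-1-(pvC board-2-j) = j+1 from by omega,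
          show pvC board-1-(pvC board-2-j+1) = j from by omega,
          show pvC board-1-(pvC board-2-j+2) = j-1 from by omega,
          show pvC board-1-(pvC board-2-j+3) = j-2 from by omega,
          show pvC board-1-(pvC board-2-j+4) = j-3 from by omega] <;>
        assumption
  · rintro ⟨i0, j0, t, hstart, hb, h0, h1, h2, h3, h4⟩
    have hL : pvL board (i0+t+1) = pvC board := pv_hlen board hpre (i0+t+1) (by omega)
    refine ⟨i0+t+1, by omega, j0-(t+1), ?_, h1, by omega, by omega, h2, h3, by omega, ?_, by omega, by omega, ?_, h4⟩
    · rcases hstart with ⟨_, hj0⟩ | ⟨_, _, rfl⟩ <;> omega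
    · rcases hstart with ⟨_, hj0⟩ | ⟨_, _, rfl⟩ <;> omega
    · rw [show i0+t+1-1 = i0+t from by omega, show j0-(t+1)+1 = j0-t from by omega]
      exact h0

lemma pv_open2_nomatch (p : Int) (l : List Int) (hno : ∀ x ∈ l, x ≠ p) : pvOpen2 p l = false := by
  rw [Bool.eq_false_iff]
  intro h
  rw [pv_open2_line_iff] at h
  obtain ⟨t, ht, _, h1, _⟩ := h
  exact hno (l.getD (t+1) 0) (pv_getD_mem l (t+1) (by omega)) h1

lemma pv_open1_nomatch (p : Int) (l : List Int) (hno : ∀ x ∈ l, x ≠ p) : pvOpen1 p l = false := by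
  rw [Bool.eq_false_iff]
  intro h
  unfold pvOpen1 at h
  simp only [List.any_eq_true, List.mem_range, Bool.and_eq_true, beq_iff_eq, and_assoc] at h
  obtain ⟨t, ht, h0, _⟩ := h
  exact hno (l.getD t 0) (pv_getD_mem l t (by omega)) h0

lemma pv_A_nop (player : Int) (board : List (List Int)) (hno : ∀ r ∈ board, player ∉ r) :
    if_2_won player board = false := by
  rw [Bool.eq_false_iff]
  intro h
  rw [pv_A_iff] at h
  obtain ⟨i, hi, j, hj, hc, _⟩ := h
  have hrow : board.getD i [] ∈ board := pv_row_mem board i hi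
  exact hno _ hrow (hc ▸ pv_getD_mem (board.getD i []) j hj)

lemma pv_B_nop (player : Int) (board : List (List Int)) (hno : ∀ r ∈ board, player ∉ r) :
    if_2_won_alt player board = false := by
  have hline : ∀ (l : List Int), (∀ x ∈ l, x ≠ player) → pvOpen2 player l = false := pv_open2_nomatch player
  have h : if_2_won_alt player board =
      (board.any (pvOpen2 player) ||
       (((List.range ((board.map List.length).foldl Nat.max 0)).map (fun j => (board.filter (fun r => decide (j < r.length))).map (fun r => r.getD j 0))).any (pvOpen1 player)) ||
       (((((List.range' 1 (board.length - 1)).map (fun i => (i, (0:Nat)))) ++ ((List.range ((board.map List.length).foldl Nat.max 0)).map (fun j => ((0:Nat), j)))).map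
         (fun s => ((List.range (board.length - s.1)).filter (fun k => decide (s.2 + k < (board.getD (s.1 + k) []).length))).map (fun k => pvG board (s.1+k) (s.2+k)))).any (pvOpen2 player)) ||
       ((((List.range ((board.map List.length).foldl Nat.max 0)).map (fun j => ((0:Nat), j))) ++ ((List.range' 1 (board.length - 1)).map (fun i => (i, (board.map List.length).foldl Nat.max 0 - 1)))).map
         (fun s => ((List.range (min (board.length - s.1) (s.2 + 1))).filter (fun k => decide (s.2 - k < (board.getD (s.1 + k) []).length))).map (fun k => pvG board (s.1+k) (s.2-k)))).any (pvOpen2 player)) := rfl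
  have hrows : board.any (pvOpen2 player) = false := by
    rw [List.any_eq_false]
    intro r hr
    rw [hline r (fun x hx hxp => hno r hr (hxp ▸ hx))]
    exact Bool.false_ne_true
  have hcols : (((List.range ((board.map List.length).foldl Nat.max 0)).map (fun j => (board.filter (fun r => decide (j < r.length))).map (fun r => r.getD j 0))).any (pvOpen1 player)) = false := by
    rw [List.any_eq_false]
    intro x hx
    obtain ⟨j, _, rfl⟩ := List.mem_map.mp hx
    rw [pv_open1_nomatch player _ (fun v hv => by
      obtain ⟨r, hr, rfl⟩ := List.mem_map.mp hv
      have hrb := List.mem_filter.mp hr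
      exact fun hvp => hno r hrb.1 (hvp ▸ pv_getD_mem r j (of_decide_eq_true hrb.2)))]
    exact Bool.false_ne_true
  have hdr : (((((List.range' 1 (board.length - 1)).map (fun i => (i, (0:Nat)))) ++ ((List.range ((board.map List.length).foldl Nat.max 0)).map (fun j => ((0:Nat), j)))).map
      (fun s => ((List.range (board.length - s.1)).filter (fun k => decide (s.2 + k < (board.getD (s.1 + k) []).length))).map (fun k => pvG board (s.1+k) (s.2+k)))).any (pvOpen2 player)) = false := by
    rw [List.any_eq_false]
    intro x hx
    obtain ⟨s, _, rfl⟩ := List.mem_map.mp hx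
    rw [hline _ (fun v hv => by
      obtain ⟨k, hk, rfl⟩ := List.mem_map.mp hv
      have hkf := List.mem_filter.mp hk
      rw [List.mem_range] at hkf
      have hrow : board.getD (s.1+k) [] ∈ board := pv_row_mem board (s.1+k) (by omega)
      exact fun hvp => hno _ hrow (hvp ▸ pv_getD_mem _ (s.2+k) (of_decide_eq_true hkf.2)))]
    exact Bool.false_ne_true
  have hdl : ((((List.range ((board.map List.length).foldl Nat.max 0)).map (fun j => ((0:Nat), j))) ++ ((List.range' 1 (board.length - 1)).map (fun i => (i, (board.map List.length).foldl Nat.max 0 - 1)))).map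
      (fun s => ((List.range (min (board.length - s.1) (s.2 + 1))).filter (fun k => decide (s.2 - k < (board.getD (s.1 + k) []).length))).map (fun k => pvG board (s.1+k) (s.2-k)))).any (pvOpen2 player) = false := by
    rw [List.any_eq_false]
    intro x hx
    obtain ⟨s, _, rfl⟩ := List.mem_map.mp hx
    rw [hline _ (fun v hv => by
      obtain ⟨k, hk, rfl⟩ := List.mem_map.mp hv
      have hkf := List.mem_filter.mp hk
      rw [List.mem_range] at hkf
      have hrow : board.getD (s.1+k) [] ∈ board := pv_row_mem board (s.1+k) (by omega)
      exact fun hvp => hno _ hrow (hvp ▸ pv_getD_mem _ (s.2-k) (of_decide_eq_true hkf.2)))]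
    exact Bool.false_ne_true
  rw [h, hrows, hcols, hdr, hdl]
  rfl

lemma pv_PA_split (player : Int) (board : List (List Int)) :
    pvPA player board ↔
      ((∃ i, i < pvR board ∧ ∃ j, j < pvL board i ∧ (pvG board i j = player ∧ pvH player board i j)) ∨
       (∃ i, i < pvR board ∧ ∃ j, j < pvL board i ∧ (pvG board i j = player ∧ pvV player board i j)) ∨
       (∃ i, i < pvR board ∧ ∃ j, j < pvL board i ∧ (pvG board i j = player ∧ pvD1 player board i j)) ∨
       (∃ i, i < pvR board ∧ ∃ j, j < pvL board i ∧ (pvG board i j = player ∧ pvD2 player board i j))) := by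
  unfold pvPA
  constructor
  · rintro ⟨i, hi, j, hj, hc, hd | hd | hd | hd⟩
    · exact Or.inl ⟨i, hi, j, hj, hc, hd⟩
    · exact Or.inr (Or.inl ⟨i, hi, j, hj, hc, hd⟩)
    · exact Or.inr (Or.inr (Or.inl ⟨i, hi, j, hj, hc, hd⟩))
    · exact Or.inr (Or.inr (Or.inr ⟨i, hi, j, hj, hc, hd⟩))
  · rintro (⟨i, hi, j, hj, hc, hd⟩ | ⟨i, hi, j, hj, hc, hd⟩ | ⟨i, hi, j, hj, hc, hd⟩ | ⟨i, hi, j, hj, hc, hd⟩)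
    · exact ⟨i, hi, j, hj, hc, Or.inl hd⟩
    · exact ⟨i, hi, j, hj, hc, Or.inr (Or.inl hd)⟩
    · exact ⟨i, hi, j, hj, hc, Or.inr (Or.inr (Or.inl hd))⟩
    · exact ⟨i, hi, j, hj, hc, Or.inr (Or.inr (Or.inr hd))⟩

-- ===== VERDICT (by name: the statement is the Claim_ definition above) =====
theorem if_2_won_spec : Claim_equal_if_2_won := by
  intro player board _ hpre
  unfold Spec_if_2_won
  have hkey : if_2_won player board = true ↔ if_2_won_alt player board = true := by
    rcases hpre with hrect | hsmall | hno
    · rw [pv_A_iff, pv_B_iff player board hrect, pv_PA_split]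
      exact or_congr (pv_rowdir player board) (or_congr (pv_coldir player board hrect)
        (or_congr (pv_d1dir player board hrect) (pv_d2dir player board hrect)))
    · rw [pv_A_iff, pv_B_small player board hsmall, pv_PA_split]
      constructor
      · rintro (h | ⟨i, hi, j, hj, hc, hV⟩ | ⟨i, hi, j, hj, hc, hD⟩ | ⟨i, hi, j, hj, hc, hD⟩)
        · exact (pv_rowdir player board).mp h
        · exact absurd hV.1 (by unfold pvR; omega)
        · exact absurd hD.1 (by unfold pvR; omega)
        · exact absurd hD.1 (by unfold pvR; omega)
      · intro h
        exact Or.inl ((pv_rowdir player board).mpr h)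
    · rw [pv_A_nop player board hno, pv_B_nop player board hno]
  cases hA : if_2_won player board <;> cases hB : if_2_won_alt player board <;> simp_all
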